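-- pv_equiv track=rewrite | github.com/pypi-data/pypi-mirror-380 | packages/speedsense/speedsense-0.2.3-py3-none-any.whl/speedsense/function_generator.py | biquadratic_time
-- ===== SOURCE A (Python) =====
-- def biquadratic_time(n):
--     s=0
--     for i in range(n):
--         for j in range(n):
--             for k in range(n):
--                 for l in range(n):
--                     s += i+j+k+l
--     return s
-- ===== SOURCE B (Python) =====
-- def biquadratic_time(n):
--     if n <= 0:
--         return 0
--     return 2 * n**4 * (n - 1)
-- ===== Notes on version B (the rewrite author's own statement) =====
-- stated objective: faster
-- what changed: Replaced the quadruple nested loop by the closed form 2*n^4*(n-1) (0 for n <= 0), derived from the arithmetic-series sum.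
import Mathlib
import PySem

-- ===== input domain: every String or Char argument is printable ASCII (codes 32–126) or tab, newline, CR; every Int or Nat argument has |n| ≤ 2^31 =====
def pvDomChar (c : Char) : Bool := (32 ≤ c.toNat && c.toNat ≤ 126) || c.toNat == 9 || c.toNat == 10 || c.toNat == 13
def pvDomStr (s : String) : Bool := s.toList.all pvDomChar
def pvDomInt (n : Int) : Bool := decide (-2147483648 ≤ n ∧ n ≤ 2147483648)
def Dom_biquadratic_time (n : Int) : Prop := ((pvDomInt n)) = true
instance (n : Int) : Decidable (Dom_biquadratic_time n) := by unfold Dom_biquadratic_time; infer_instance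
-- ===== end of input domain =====

-- B replaces A's quadruple O(n^4) loop by the closed form 2*n^4*(n-1) (0 for n ≤ 0): asymptotically faster.

-- ===== PORT A =====
def biquadratic_time (n : Int) : Int :=
  (PySem.List.pyRange 0 n 1).foldl (fun s i =>
    (PySem.List.pyRange 0 n 1).foldl (fun s j =>
      (PySem.List.pyRange 0 n 1).foldl (fun s k =>
        (PySem.List.pyRange 0 n 1).foldl (fun s l => s + (i + j + k + l)) s) s) s) 0

-- ===== PORT B =====
def biquadratic_time_alt (n : Int) : Int :=
  if n ≤ 0 then 0 else 2 * n ^ 4 * (n - 1)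

-- ===== PRECONDITION & SPEC =====
def Spec_biquadratic_time (n : Int) (out : Int) : Prop := out = biquadratic_time_alt n
instance (n : Int) (out : Int) : Decidable (Spec_biquadratic_time n out) := by unfold Spec_biquadratic_time; infer_instance

-- ===== CLAIM (what is proved, stated in full; the proofs are below) =====
def Claim_equal_biquadratic_time : Prop := ∀ (n : Int), Dom_biquadratic_time n → Spec_biquadratic_time n (biquadratic_time n)

-- ===== LEMMAS AND PROOFS =====

/-- Triangular number 0 + 1 + … + (m-1), as an Int. -/
def pvTri : Nat → Int
  | 0 => 0
  | m + 1 => pvTri m + m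

theorem pvTri_double (m : Nat) : 2 * pvTri m = m * (m - 1 : Int) := by
  induction m with
  | zero => simp [pvTri]
  | succ m ih => simp only [pvTri]; push_cast; ring_nf; ring_nf at ih; omega

/-- Sum of an affine map over range(m). -/
theorem pvSumAffine (m : Nat) (a b : Int) :
    ((PySem.List.pyRange 0 (m : Int) 1).map (fun x => a + b * x)).sum
      = m * a + b * pvTri m := by
  induction m with
  | zero => simp [pvTri]
  | succ m ih =>
    have h : ((m : Int) + 1) = ((m + 1 : Nat) : Int) := by omega
    rw [← h, PySem.List.pyRange_one_succ_right (by positivity)]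
    simp only [List.map_append, List.sum_append, List.map_cons, List.map_nil,
      List.sum_cons, List.sum_nil, ih, pvTri]
    ring

/-- One loop layer 'for x in range(m): s += a + b*x' in closed form. -/
theorem pvLayer (m : Nat) (a b s : Int) :
    (PySem.List.pyRange 0 (m : Int) 1).foldl (fun s x => s + (a + b * x)) s
      = s + (m * a + b * pvTri m) := by
  rw [PySem.List.foldl_add, pvSumAffine]

theorem pvClosed (m : Nat) :
    biquadratic_time (m : Int) = 4 * (m : Int) ^ 3 * pvTri m := by
  unfold biquadratic_time
  have h4 : ∀ (i j k s : Int),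
      (PySem.List.pyRange 0 (m : Int) 1).foldl (fun s l => s + (i + j + k + l)) s
        = s + (m * (i + j + k) + 1 * pvTri m) := by
    intro i j k s
    have := pvLayer m (i + j + k) 1 s
    simpa using this
  simp only [h4]
  have h3 : ∀ (i j s : Int),
      (PySem.List.pyRange 0 (m : Int) 1).foldl
          (fun s k => s + ((m : Int) * (i + j + k) + 1 * pvTri m)) s
        = s + (m * ((m : Int) * (i + j) + 1 * pvTri m) + (m : Int) * pvTri m) := by
    intro i j s
    have h := pvLayer m ((m : Int) * (i + j) + 1 * pvTri m) (m : Int) s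
    rw [← h]
    exact PySem.List.foldl_congr_mem _ _ _ _ (fun s' x _ => by ring)
  simp only [h3]
  have h2 : ∀ (i s : Int),
      (PySem.List.pyRange 0 (m : Int) 1).foldl
          (fun s j => s + ((m : Int) * ((m : Int) * (i + j) + 1 * pvTri m)
            + (m : Int) * pvTri m)) s
        = s + (m * ((m : Int) ^ 2 * i + 2 * (m : Int) * pvTri m) + (m : Int) ^ 2 * pvTri m) := by
    intro i s
    have h := pvLayer m ((m : Int) ^ 2 * i + 2 * (m : Int) * pvTri m) ((m : Int) ^ 2) s
    rw [← h]
    exact PySem.List.foldl_congr_mem _ _ _ _ (fun s' x _ => by ring)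
  simp only [h2]
  have h1 :
      (PySem.List.pyRange 0 (m : Int) 1).foldl
          (fun s i => s + ((m : Int) * ((m : Int) ^ 2 * i + 2 * (m : Int) * pvTri m)
            + (m : Int) ^ 2 * pvTri m)) 0
        = 0 + (m * (3 * (m : Int) ^ 2 * pvTri m) + (m : Int) ^ 3 * pvTri m) := by
    have h := pvLayer m (3 * (m : Int) ^ 2 * pvTri m) ((m : Int) ^ 3) 0
    rw [← h]
    exact PySem.List.foldl_congr_mem _ _ _ _ (fun s' x _ => by ring)
  rw [h1]; ring

-- ===== VERDICT (by name: the statement is the Claim_ definition above) =====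
theorem biquadratic_time_spec : Claim_equal_biquadratic_time := by
  intro n _
  unfold Spec_biquadratic_time biquadratic_time_alt
  by_cases hn : n ≤ 0
  · rw [if_pos hn]
    unfold biquadratic_time
    rw [PySem.List.pyRange_one_eq_nil (by omega)]
    rfl
  · rw [if_neg hn]
    have hm : n = (n.toNat : Int) := by omega
    rw [hm, pvClosed]
    linear_combination 2 * (n.toNat : Int) ^ 3 * pvTri_double n.toNat
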